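-- pv_equiv track=rewrite | github.com/yotti5160/Codility | Challenges/DigitalGold2018.py | solution
-- ===== SOURCE A (Python) =====
-- def solution(N, M, X, Y):
--     K=len(X)
--     if K&1==1:
--         return 0
--     targetSum=K//2
--     def check(size,array):
--         book=[0]*size
--         for a in array:
--             book[a]+=1
--         left, right, tmpSum=None, None, 0
--         for i in range(size):
--             tmpSum+=book[i]
--             if tmpSum==targetSum and left==None:
--                 left=i
--                 right=i
--             elif tmpSum==targetSum:
--                 right=i
--             elif tmpSum>targetSum:
--                 break
--         if left!=None and right!=None:
--             return right-left+1
--         return 0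
--     return check(N, X)+check(M, Y)
-- ===== SOURCE B (Python) =====
-- def solution(N, M, X, Y):
--     # Sort each coordinate list and read the answer off two order statistics,
--     # instead of bucket-counting into a size-length array and scanning it.
--     K = len(X)
--     if K % 2:
--         return 0
--     t = K // 2
--
--     def axis(size, arr):
--         # positions i in [0, size) with exactly t coordinates <= i form the
--         # interval [s[t-1], s[t]) in the sorted list s (with s[-1] -> 0 and
--         # s[len] -> size as sentinels); return its length
--         if size <= 0 or t > len(arr):
--             return 0
--         s = sorted(arr)
--         lo = s[t - 1] if t >= 1 else 0
--         hi = s[t] if t < len(s) else size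
--         return hi - lo
--
--     return axis(N, X) + axis(M, Y)
-- ===== Notes on version B (the rewrite author's own statement) =====
-- stated objective: alternative
-- what changed: check's bucket array of length size plus cumulative scan with break is replaced, per axis, by sorting the coordinate list and returning the length of the interval [s[t-1], s[t]) of its order statistics (with 0 / size as sentinels).
-- outside the precondition, e.g. on solution(3, 0, [-1, 0], []): A returns 2, B returns 1
import Mathlib
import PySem

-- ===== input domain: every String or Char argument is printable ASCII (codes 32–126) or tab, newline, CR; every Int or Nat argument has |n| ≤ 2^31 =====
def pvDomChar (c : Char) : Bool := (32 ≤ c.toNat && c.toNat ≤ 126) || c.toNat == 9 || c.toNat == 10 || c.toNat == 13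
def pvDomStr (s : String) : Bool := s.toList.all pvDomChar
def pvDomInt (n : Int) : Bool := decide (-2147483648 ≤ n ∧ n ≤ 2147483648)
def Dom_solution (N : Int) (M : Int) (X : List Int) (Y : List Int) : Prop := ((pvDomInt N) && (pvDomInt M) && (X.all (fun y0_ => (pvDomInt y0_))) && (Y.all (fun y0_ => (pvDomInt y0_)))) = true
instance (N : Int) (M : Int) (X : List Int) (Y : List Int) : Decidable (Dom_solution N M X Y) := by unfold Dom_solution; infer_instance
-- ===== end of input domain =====

-- B replaces A's bucket array + cumulative scan per axis by sorting and two order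
-- statistics (alternative algorithm, similar cost); equal on valid grid coordinates.


-- ===== PORT A =====
-- 'for i in range(size)' with break, tracking left/right/tmpSum (break = returning the pair)
def pvCheckLoop (t : Int) (book : List Int) (idxs : List Int)
    (left right : Option Int) (tmp : Int) : Option Int × Option Int :=
  match idxs with
  | [] => (left, right)
  | i :: rest =>
    let tmp' := tmp + PySem.List.pyGetD book i 0
    if tmp' = t ∧ left = none then pvCheckLoop t book rest (some i) (some i) tmp'
    else if tmp' = t then pvCheckLoop t book rest left (some i) tmp'
    else if tmp' > t then (left, right)
    else pvCheckLoop t book rest left right tmp'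

def pvCheck (t : Int) (size : Int) (array : List Int) : Int :=
  let book0 := List.replicate size.toNat (0 : Int)          -- book = [0]*size
  let book := array.foldl                                   -- for a in array: book[a] += 1
    (fun bk a => PySem.List.pySetD bk a (PySem.List.pyGetD bk a 0 + 1)) book0
  match pvCheckLoop t book (PySem.List.pyRange 0 size 1) none none 0 with
  | (some l, some r) => r - l + 1
  | _ => 0

def solution (N : Int) (M : Int) (X : List Int) (Y : List Int) : Int :=
  let K : Int := X.length
  if K % 2 = 1 then 0
  else pvCheck (K / 2) N X + pvCheck (K / 2) M Y

-- ===== PORT B =====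
def pvAxis (t : Int) (size : Int) (arr : List Int) : Int :=
  if size ≤ 0 ∨ t > (arr.length : Int) then 0
  else
    let s := PySem.List.sorted arr (fun x => x) false
    let lo := if 1 ≤ t then PySem.List.pyGetD s (t - 1) 0 else 0
    let hi := if t < (s.length : Int) then PySem.List.pyGetD s t 0 else size
    hi - lo

def solution_alt (N : Int) (M : Int) (X : List Int) (Y : List Int) : Int :=
  let K : Int := X.length
  if K % 2 ≠ 0 then 0
  else pvAxis (K / 2) N X + pvAxis (K / 2) M Y

-- ===== PRECONDITION & SPEC =====
-- Pre restricts to the natural domain of valid grid coordinates 0 ≤ x < size (only needed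
-- when K is even, the only case in which A reads them): outside it A either raises
-- IndexError or silently wraps negative indices to the other end of the row.
def Pre_solution (N : Int) (M : Int) (X : List Int) (Y : List Int) : Prop :=
  X.length % 2 = 0 → ((∀ a ∈ X, 0 ≤ a ∧ a < N) ∧ (∀ b ∈ Y, 0 ≤ b ∧ b < M))
instance (N : Int) (M : Int) (X : List Int) (Y : List Int) : Decidable (Pre_solution N M X Y) := by
  unfold Pre_solution; infer_instance

def pvWitness_solution : Int × Int × List Int × List Int := (2, 3, [0, 1], [2, 0])

def Spec_solution (N : Int) (M : Int) (X : List Int) (Y : List Int) (out : Int) : Prop := out = solution_alt N M X Y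
instance (N : Int) (M : Int) (X : List Int) (Y : List Int) (out : Int) : Decidable (Spec_solution N M X Y out) := by unfold Spec_solution; infer_instance

-- ===== CLAIM (what is proved, stated in full; the proofs are below) =====
def Claim_equal_solution : Prop := ∀ (N : Int) (M : Int) (X : List Int) (Y : List Int), Dom_solution N M X Y → Pre_solution N M X Y → Spec_solution N M X Y (solution N M X Y)

-- ===== LEMMAS AND PROOFS =====

-- prefix count: number of coordinates ≤ i
def pvPrefix (arr : List Int) (i : Int) : Int := (arr.countP (fun a => decide (a ≤ i)) : Int)

theorem pvPrefix_neg (arr : List Int) (h : ∀ a ∈ arr, 0 ≤ a) : pvPrefix arr (-1) = 0 := by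
  unfold pvPrefix
  have : arr.countP (fun a => decide (a ≤ (-1 : Int))) = 0 := by
    rw [List.countP_eq_zero]
    intro a ha
    have := h a ha
    simp
    omega
  simp [this]

theorem pvPrefix_le (arr : List Int) (i : Int) : pvPrefix arr i ≤ (arr.length : Int) := by
  unfold pvPrefix
  exact_mod_cast List.countP_le_length

theorem pvPrefix_step (arr : List Int) (i : Int) :
    pvPrefix arr i = pvPrefix arr (i - 1) + (arr.count i : Int) := by
  unfold pvPrefix
  induction arr with
  | nil => simp
  | cons a rest ih =>
    have hcount : (a :: rest).count i = rest.count i + (if i = a then 1 else 0) := by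
      rw [List.count_cons]
      rcases eq_or_ne i a with h | h
      · rw [if_pos (by simp; omega), if_pos h]
      · rw [if_neg (by simp; omega), if_neg h]
    rw [List.countP_cons, List.countP_cons, hcount]
    push_cast at ih ⊢
    by_cases h1 : a ≤ i
    · by_cases h2 : a ≤ i - 1
      · rw [if_pos (by simpa using h1), if_pos (by simpa using h2), if_neg (by omega)]
        omega
      · rw [if_pos (by simpa using h1), if_neg (by simpa using h2), if_pos (by omega)]
        omega
    · rw [if_neg (by simpa using h1), if_neg (by simp; omega), if_neg (by omega)]
      omega

theorem pvBook_spec (arr : List Int) (bk : List Int)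
    (h : ∀ a ∈ arr, 0 ≤ a ∧ a < (bk.length : Int)) :
    (arr.foldl (fun b a => PySem.List.pySetD b a (PySem.List.pyGetD b a 0 + 1)) bk).length = bk.length ∧
    ∀ i : Int, 0 ≤ i → i < (bk.length : Int) →
      PySem.List.pyGetD (arr.foldl (fun b a => PySem.List.pySetD b a (PySem.List.pyGetD b a 0 + 1)) bk) i 0
        = PySem.List.pyGetD bk i 0 + (arr.count i : Int) := by
  induction arr generalizing bk with
  | nil => simp
  | cons a rest ih =>
    obtain ⟨ha0, haL⟩ := h a (by simp)
    have hset : PySem.List.pySetD bk a (PySem.List.pyGetD bk a 0 + 1)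
        = bk.set a.toNat (PySem.List.pyGetD bk a 0 + 1) :=
      PySem.List.pySetD_of_nonneg _ _ ha0
    have hlen : (bk.set a.toNat (PySem.List.pyGetD bk a 0 + 1)).length = bk.length := by simp
    have hrest : ∀ x ∈ rest, 0 ≤ x ∧ x < ((bk.set a.toNat (PySem.List.pyGetD bk a 0 + 1)).length : Int) := by
      intro x hx
      rw [hlen]
      exact h x (by simp [hx])
    obtain ⟨ihlen, ihget⟩ := ih _ hrest
    refine ⟨by simp only [List.foldl_cons, hset, ihlen, hlen], ?_⟩
    intro i hi0 hiL
    simp only [List.foldl_cons, hset]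
    rw [ihget i hi0 (by rw [hlen]; exact hiL)]
    have hanat : a.toNat < bk.length := by omega
    have hinat : i.toNat < bk.length := by omega
    have hgi : PySem.List.pyGetD (bk.set a.toNat (PySem.List.pyGetD bk a 0 + 1)) i 0
        = if i.toNat = a.toNat then PySem.List.pyGetD bk a 0 + 1 else PySem.List.pyGetD bk i 0 := by
      rw [PySem.List.pyGetD_eq_getElem _ _ hi0 (by rw [hlen]; exact hiL)]
      rw [List.getElem_set]
      by_cases hia : i.toNat = a.toNat
      · simp [hia]
      · have hai : ¬ a.toNat = i.toNat := fun hh => hia hh.symm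
        rw [if_neg hai, if_neg hia, PySem.List.pyGetD_eq_getElem _ _ hi0 hiL]
    rw [hgi]
    have hcount : (a :: rest).count i = rest.count i + (if i = a then 1 else 0) := by
      rw [List.count_cons]
      rcases eq_or_ne i a with h | h
      · rw [if_pos (by simp; omega), if_pos h]
      · rw [if_neg (by simp; omega), if_neg h]
    rw [hcount]
    by_cases hia : i.toNat = a.toNat
    · have hiaZ : i = a := by omega
      rw [if_pos hia, if_pos hiaZ, hiaZ]
      push_cast
      omega
    · have hiaZ : ¬ i = a := by omega
      rw [if_neg hia, if_neg hiaZ]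
      push_cast
      omega

theorem pvCheckLoop_cons (t : Int) (book : List Int) (i : Int) (rest : List Int)
    (left right : Option Int) (tmp : Int) :
    pvCheckLoop t book (i :: rest) left right tmp =
      if tmp + PySem.List.pyGetD book i 0 = t ∧ left = none then
        pvCheckLoop t book rest (some i) (some i) (tmp + PySem.List.pyGetD book i 0)
      else if tmp + PySem.List.pyGetD book i 0 = t then
        pvCheckLoop t book rest left (some i) (tmp + PySem.List.pyGetD book i 0)
      else if tmp + PySem.List.pyGetD book i 0 > t then (left, right)
      else pvCheckLoop t book rest left right (tmp + PySem.List.pyGetD book i 0) := rfl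

-- skip phase: while the prefix sum stays below the target nothing is recorded
theorem pvLoop_skip (t : Int) (book arr : List Int) (n : Nat) :
    ∀ (a b : Int) (rest : List Int), (b - a).toNat = n → 0 ≤ a → a ≤ b →
    (∀ i : Int, a ≤ i → i < b → PySem.List.pyGetD book i 0 = (arr.count i : Int)) →
    (∀ i : Int, a ≤ i → i < b → pvPrefix arr i < t) →
    pvCheckLoop t book (PySem.List.pyRange a b 1 ++ rest) none none (pvPrefix arr (a - 1))
      = pvCheckLoop t book rest none none (pvPrefix arr (b - 1)) := by
  induction n with
  | zero =>
    intro a b rest hn ha0 hab _ _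
    rw [PySem.List.pyRange_one_eq_nil (by omega), List.nil_append,
      show a - 1 = b - 1 by omega]
  | succ m ih =>
    intro a b rest hn ha0 hab hbook hlt
    have hab' : a < b := by omega
    rw [PySem.List.pyRange_one_cons hab', List.cons_append, pvCheckLoop_cons]
    have htmp : pvPrefix arr (a - 1) + PySem.List.pyGetD book a 0 = pvPrefix arr a := by
      rw [hbook a (le_refl a) hab', ← pvPrefix_step]
    rw [htmp]
    have hPa : pvPrefix arr a < t := hlt a (le_refl a) hab'
    rw [if_neg (fun hc => by omega), if_neg (by omega), if_neg (by omega)]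
    have hstep : pvPrefix arr a = pvPrefix arr ((a + 1) - 1) := by norm_num
    rw [hstep]
    exact ih (a + 1) b rest (by omega) (by omega) (by omega)
      (fun i h1 h2 => hbook i (by omega) h2) (fun i h1 h2 => hlt i (by omega) h2)

-- equal phase: while the prefix sum equals the target the right end advances
theorem pvLoop_eq (t : Int) (book arr : List Int) (n : Nat) :
    ∀ (a b l r : Int) (rest : List Int), (b - a).toNat = n → 0 ≤ a → a ≤ b →
    (∀ i : Int, a ≤ i → i < b → PySem.List.pyGetD book i 0 = (arr.count i : Int)) →
    (∀ i : Int, a ≤ i → i < b → pvPrefix arr i = t) →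
    pvCheckLoop t book (PySem.List.pyRange a b 1 ++ rest) (some l) (some r) (pvPrefix arr (a - 1))
      = pvCheckLoop t book rest (some l) (some (if a < b then b - 1 else r)) (pvPrefix arr (b - 1)) := by
  induction n with
  | zero =>
    intro a b l r rest hn ha0 hab _ _
    rw [PySem.List.pyRange_one_eq_nil (by omega), List.nil_append, if_neg (by omega),
      show a - 1 = b - 1 by omega]
  | succ m ih =>
    intro a b l r rest hn ha0 hab hbook heq
    have hab' : a < b := by omega
    rw [PySem.List.pyRange_one_cons hab', List.cons_append, pvCheckLoop_cons]
    have htmp : pvPrefix arr (a - 1) + PySem.List.pyGetD book a 0 = pvPrefix arr a := by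
      rw [hbook a (le_refl a) hab', ← pvPrefix_step]
    rw [htmp]
    have hPa : pvPrefix arr a = t := heq a (le_refl a) hab'
    rw [if_neg (fun hc => by simpa using hc.2), if_pos hPa]
    have hstep : pvPrefix arr a = pvPrefix arr ((a + 1) - 1) := by norm_num
    rw [hstep]
    rw [ih (a + 1) b l a rest (by omega) (by omega) (by omega)
      (fun i h1 h2 => hbook i (by omega) h2) (fun i h1 h2 => heq i (by omega) h2)]
    congr 2
    by_cases hc : a + 1 < b
    · rw [if_pos hc, if_pos hab']
    · have hab1 : a = b - 1 := by omega
      rw [if_neg hc, if_pos hab', hab1]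

-- full scan: with the equal-prefix region [L, H) the loop returns its endpoints
theorem pvScan_eval (t size L H : Int) (book arr : List Int)
    (HB : ∀ i : Int, 0 ≤ i → i < size → PySem.List.pyGetD book i 0 = (arr.count i : Int))
    (hP0 : pvPrefix arr (-1) = 0)
    (hL0 : 0 ≤ L) (hLs : L < size) (hLH : L ≤ H) (hHs : H ≤ size)
    (C1 : ∀ i : Int, 0 ≤ i → (t ≤ pvPrefix arr i ↔ L ≤ i))
    (C2 : ∀ i : Int, 0 ≤ i → i < size → (t + 1 ≤ pvPrefix arr i ↔ H ≤ i)) :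
    pvCheckLoop t book (PySem.List.pyRange 0 size 1) none none 0 =
      if L < H then (some L, some (H - 1)) else (none, none) := by
  have hsplit : PySem.List.pyRange 0 size 1
      = PySem.List.pyRange 0 L 1 ++ PySem.List.pyRange L size 1 :=
    PySem.List.pyRange_one_append 0 L size hL0 (by omega)
  have hskip := pvLoop_skip t book arr (L - 0).toNat 0 L (PySem.List.pyRange L size 1)
    rfl (le_refl 0) hL0
    (fun i h1 h2 => HB i h1 (by omega))
    (fun i h1 h2 => by
      by_contra hc
      have hle : t ≤ pvPrefix arr i := by omega
      exact absurd ((C1 i h1).mp hle) (by omega))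
  rw [show pvPrefix arr (0 - 1) = 0 by rw [show (0 : Int) - 1 = -1 by ring, hP0]] at hskip
  rw [hsplit, hskip]
  rw [PySem.List.pyRange_one_cons hLs, pvCheckLoop_cons]
  have htmp : pvPrefix arr (L - 1) + PySem.List.pyGetD book L 0 = pvPrefix arr L := by
    rw [HB L hL0 hLs, ← pvPrefix_step]
  rw [htmp]
  by_cases hLH' : L < H
  · have hPL : pvPrefix arr L = t := by
      have h1 := (C1 L hL0).mpr (le_refl L)
      have h2 : ¬ (t + 1 ≤ pvPrefix arr L) := fun hc => absurd ((C2 L hL0 hLs).mp hc) (by omega)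
      omega
    rw [if_pos ⟨hPL, rfl⟩]
    have hsplit2 : PySem.List.pyRange (L + 1) size 1
        = PySem.List.pyRange (L + 1) H 1 ++ PySem.List.pyRange H size 1 :=
      PySem.List.pyRange_one_append (L + 1) H size (by omega) hHs
    have hstep : pvPrefix arr L = pvPrefix arr ((L + 1) - 1) := by norm_num
    rw [hsplit2, hstep]
    rw [pvLoop_eq t book arr (H - (L + 1)).toNat (L + 1) H L L _ rfl (by omega) (by omega)
      (fun i h1 h2 => HB i (by omega) (by omega))
      (fun i h1 h2 => by
        have hA := (C1 i (by omega)).mpr (by omega)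
        have hB : ¬ (t + 1 ≤ pvPrefix arr i) :=
          fun hc => absurd ((C2 i (by omega) (by omega)).mp hc) (by omega)
        omega)]
    have hR : (if L + 1 < H then H - 1 else L) = H - 1 := by
      by_cases hc : L + 1 < H
      · rw [if_pos hc]
      · rw [if_neg hc]; omega
    rw [hR, if_pos hLH']
    by_cases hHsz : H < size
    · rw [PySem.List.pyRange_one_cons hHsz, pvCheckLoop_cons]
      have htmpH : pvPrefix arr (H - 1) + PySem.List.pyGetD book H 0 = pvPrefix arr H := by
        rw [HB H (by omega) hHsz, ← pvPrefix_step]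
      rw [htmpH]
      have hPH : t + 1 ≤ pvPrefix arr H := (C2 H (by omega) hHsz).mpr (le_refl H)
      rw [if_neg (fun hc => by omega), if_neg (by omega), if_pos (by omega)]
    · have hHsize : H = size := by omega
      rw [hHsize, PySem.List.pyRange_one_eq_nil (le_refl size)]
      rfl
  · -- L = H: the prefix sum jumps past the target at L
    have hPL : t + 1 ≤ pvPrefix arr L := (C2 L hL0 hLs).mpr (by omega)
    rw [if_neg (fun hc => by omega), if_neg (by omega), if_pos (by omega), if_neg hLH']

-- order statistic: at least k+1 elements are ≤ x iff the (k+1)-st smallest is ≤ x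
theorem pvOrdStat (s : List Int)
    (hmono : ∀ (p q : Nat), (hpq : p ≤ q) → (hq : q < s.length) → s[p]'(by omega) ≤ s[q])
    (k : Nat) (hk : k < s.length) (x : Int) :
    ((k : Int) + 1 ≤ (s.countP (fun a => decide (a ≤ x)) : Int)) ↔ s[k] ≤ x := by
  have key : (k + 1 ≤ s.countP (fun a => decide (a ≤ x))) ↔ s[k] ≤ x := by
    constructor
    · intro hcount
      by_contra hx
      have hsp : s = s.take k ++ s.drop k := (List.take_append_drop k s).symm
      have h1 : (s.take k).countP (fun a => decide (a ≤ x)) ≤ k := by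
        calc (s.take k).countP (fun a => decide (a ≤ x)) ≤ (s.take k).length :=
              List.countP_le_length
          _ ≤ k := by simp
      have h2 : (s.drop k).countP (fun a => decide (a ≤ x)) = 0 := by
        rw [List.countP_eq_zero]
        intro a ha
        obtain ⟨j, hj, hja⟩ := List.mem_iff_getElem.mp ha
        have hjd : (s.drop k).length = s.length - k := by simp
        have hja' : a = s[k + j]'(by omega) := by
          rw [← hja, List.getElem_drop]
        have hmk : s[k] ≤ s[k + j]'(by omega) := hmono k (k + j) (by omega) (by omega)
        simp only [decide_eq_true_eq]
        omega
      rw [hsp, List.countP_append, h2] at hcount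
      omega
    · intro hx
      have hsp : s = s.take (k + 1) ++ s.drop (k + 1) := (List.take_append_drop (k + 1) s).symm
      have h1 : (s.take (k + 1)).countP (fun a => decide (a ≤ x)) = k + 1 := by
        rw [List.countP_eq_length.mpr, List.length_take]
        · omega
        · intro a ha
          obtain ⟨j, hj, hja⟩ := List.mem_iff_getElem.mp ha
          have hjlen : j < k + 1 := by
            have hjl := hj
            simp only [List.length_take] at hjl
            omega
          have hja' : a = s[j]'(by omega) := by
            rw [← hja, List.getElem_take]
          have hjk : s[j]'(by omega) ≤ s[k] := hmono j k (by omega) hk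
          simp only [decide_eq_true_eq]
          omega
      have hsum : s.countP (fun a => decide (a ≤ x))
          = (s.take (k + 1)).countP (fun a => decide (a ≤ x))
            + (s.drop (k + 1)).countP (fun a => decide (a ≤ x)) := by
        conv_lhs => rw [hsp]
        rw [List.countP_append]
      omega
  constructor
  · intro h
    exact key.mp (by exact_mod_cast h)
  · intro h
    exact_mod_cast key.mpr h

theorem pvCount_nonneg (arr : List Int) (i : Int) : 0 ≤ pvPrefix arr i := by
  unfold pvPrefix
  positivity

theorem check_eq_axis (t size : Int) (arr : List Int) (ht : 0 ≤ t)
    (h : ∀ a ∈ arr, 0 ≤ a ∧ a < size) : pvCheck t size arr = pvAxis t size arr := by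
  by_cases hsz : size ≤ 0
  · have harr : arr = [] := by
      cases arr with
      | nil => rfl
      | cons a rest =>
        have := h a (by simp)
        exact absurd this (by intro hh; omega)
    subst harr
    unfold pvCheck pvAxis
    rw [PySem.List.pyRange_one_eq_nil (by omega : size ≤ 0)]
    simp only [List.foldl_nil]
    rw [if_pos (Or.inl hsz)]
    rfl
  · have hsz' : 0 < size := by omega
    have hb0len : (List.replicate size.toNat (0 : Int)).length = size.toNat :=
      List.length_replicate
    obtain ⟨hblen, hbget⟩ := pvBook_spec arr (List.replicate size.toNat (0 : Int))
      (by intro a ha; have := h a ha; rw [hb0len]; omega)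
    have HB : ∀ i : Int, 0 ≤ i → i < size →
        PySem.List.pyGetD
          (arr.foldl (fun b a => PySem.List.pySetD b a (PySem.List.pyGetD b a 0 + 1))
            (List.replicate size.toNat (0 : Int))) i 0 = (arr.count i : Int) := by
      intro i hi0 hiL
      rw [hbget i hi0 (by rw [hb0len]; omega)]
      rw [PySem.List.pyGetD_eq_getElem _ _ hi0 (by rw [hb0len]; omega)]
      simp
    have hP0 : pvPrefix arr (-1) = 0 := pvPrefix_neg arr (fun a ha => (h a ha).1)
    by_cases htn : (arr.length : Int) < t
    · -- target beyond the number of coordinates: the loop never records anything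
      have hskip := pvLoop_skip t _ arr (size - 0).toNat 0 size [] rfl (le_refl 0) (by omega)
        (fun i h1 h2 => HB i h1 h2)
        (fun i h1 h2 => lt_of_le_of_lt (pvPrefix_le arr i) htn)
      rw [show pvPrefix arr (0 - 1) = 0 by rw [show (0 : Int) - 1 = -1 by ring, hP0]] at hskip
      unfold pvCheck pvAxis
      dsimp only
      rw [List.append_nil] at hskip
      rw [hskip, if_pos (Or.inr htn)]
      rfl
    · have htn' : t ≤ (arr.length : Int) := by omega
      have hslen : (PySem.List.sorted arr (fun x => x) false).length = arr.length :=
        PySem.List.length_sorted arr (fun x => x) false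
      have hperm : (PySem.List.sorted arr (fun x => x) false).Perm arr :=
        PySem.List.sorted_perm arr (fun x => x) false
      have hcount_eq : ∀ x : Int, pvPrefix arr x
          = ((PySem.List.sorted arr (fun x => x) false).countP (fun a => decide (a ≤ x)) : Int) := by
        intro x
        unfold pvPrefix
        rw [hperm.countP_eq]
      have hmono : ∀ (p q : Nat), (hpq : p ≤ q) →
          (hq : q < (PySem.List.sorted arr (fun x => x) false).length) →
          (PySem.List.sorted arr (fun x => x) false)[p]'(by omega)
            ≤ (PySem.List.sorted arr (fun x => x) false)[q] :=
        fun p q hpq hq => PySem.List.sorted_id_getElem_mono arr hpq hq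
      have hmem : ∀ (j : Nat) (hj : j < (PySem.List.sorted arr (fun x => x) false).length),
          0 ≤ (PySem.List.sorted arr (fun x => x) false)[j] ∧
            (PySem.List.sorted arr (fun x => x) false)[j] < size := by
        intro j hj
        exact h _ ((PySem.List.mem_sorted arr (fun x => x) false _).mp (List.getElem_mem hj))
      obtain ⟨L, H, hL0, hLs, hLH, hHs, C1, C2, hlo, hhi⟩ :
          ∃ L H : Int, 0 ≤ L ∧ L < size ∧ L ≤ H ∧ H ≤ size ∧
            (∀ i : Int, 0 ≤ i → (t ≤ pvPrefix arr i ↔ L ≤ i)) ∧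
            (∀ i : Int, 0 ≤ i → i < size → (t + 1 ≤ pvPrefix arr i ↔ H ≤ i)) ∧
            ((if 1 ≤ t then PySem.List.pyGetD (PySem.List.sorted arr (fun x => x) false) (t - 1) 0 else 0) = L) ∧
            ((if t < ((PySem.List.sorted arr (fun x => x) false).length : Int)
              then PySem.List.pyGetD (PySem.List.sorted arr (fun x => x) false) t 0 else size) = H) := by
        by_cases ht1 : 1 ≤ t
        · have hk1 : (t - 1).toNat < (PySem.List.sorted arr (fun x => x) false).length := by
            rw [hslen]; omega
          refine ⟨(PySem.List.sorted arr (fun x => x) false)[(t - 1).toNat], ?_⟩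
          have hLb := hmem _ hk1
          have hC1 : ∀ i : Int, 0 ≤ i → (t ≤ pvPrefix arr i ↔
              (PySem.List.sorted arr (fun x => x) false)[(t - 1).toNat] ≤ i) := by
            intro i _
            have ho := pvOrdStat _ hmono _ hk1 i
            rw [show (((t - 1).toNat : Int)) + 1 = t from by omega] at ho
            rw [hcount_eq i]
            exact ho
          by_cases htn2 : t < (arr.length : Int)
          · have hk2 : t.toNat < (PySem.List.sorted arr (fun x => x) false).length := by
              rw [hslen]; omega
            refine ⟨(PySem.List.sorted arr (fun x => x) false)[t.toNat], hLb.1, hLb.2,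
              hmono _ _ (by omega) hk2, (hmem _ hk2).2.le, hC1, ?_, ?_, ?_⟩
            · intro i _ _
              have ho := pvOrdStat _ hmono _ hk2 i
              rw [show ((t.toNat : Int)) + 1 = t + 1 from by omega] at ho
              rw [hcount_eq i]
              exact ho
            · rw [if_pos ht1, PySem.List.pyGetD_eq_getElem _ _ (by omega) (by omega)]
            · rw [if_pos (by omega), PySem.List.pyGetD_eq_getElem _ _ (by omega) (by omega)]
          · have htn3 : t = (arr.length : Int) := by omega
            refine ⟨size, hLb.1, hLb.2, hLb.2.le, le_refl size, hC1, ?_, ?_, ?_⟩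
            · intro i _ hiL
              constructor
              · intro hc
                exact absurd (lt_of_lt_of_le (by omega : t < pvPrefix arr i) (pvPrefix_le arr i))
                  (by omega)
              · intro hc; omega
            · rw [if_pos ht1, PySem.List.pyGetD_eq_getElem _ _ (by omega) (by omega)]
            · rw [if_neg (by rw [hslen]; omega)]
        · have ht0 : t = 0 := by omega
          subst ht0
          refine ⟨0, ?_⟩
          have hC1 : ∀ i : Int, 0 ≤ i → ((0 : Int) ≤ pvPrefix arr i ↔ (0 : Int) ≤ i) := by
            intro i hi
            constructor
            · intro _; exact hi
            · intro _; exact pvCount_nonneg arr i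
          by_cases hn0 : arr.length = 0
          · refine ⟨size, le_refl 0, hsz', by omega, le_refl size, hC1, ?_, by rw [if_neg (by omega)], ?_⟩
            · intro i _ hiL
              have hple := pvPrefix_le arr i
              constructor
              · intro hc; omega
              · intro hc; omega
            · rw [if_neg (by rw [hslen]; omega)]
          · have hk0 : 0 < (PySem.List.sorted arr (fun x => x) false).length := by
              rw [hslen]; omega
            refine ⟨(PySem.List.sorted arr (fun x => x) false)[0], le_refl 0, hsz',
              (hmem _ hk0).1, (hmem _ hk0).2.le, hC1, ?_, by rw [if_neg (by omega)], ?_⟩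
            · intro i _ _
              have ho := pvOrdStat _ hmono 0 hk0 i
              rw [show (((0 : Nat) : Int)) + 1 = (0 : Int) + 1 from by norm_num] at ho
              rw [hcount_eq i]
              exact ho
            · rw [if_pos (by rw [hslen]; omega),
                PySem.List.pyGetD_eq_getElem _ _ (le_refl 0) (by omega)]
              norm_num
      unfold pvCheck pvAxis
      dsimp only
      rw [pvScan_eval t size L H _ arr HB hP0 hL0 hLs hLH hHs C1 C2]
      rw [if_neg (show ¬ (size ≤ 0 ∨ t > (arr.length : Int)) from by omega)]
      rw [hlo, hhi]
      by_cases hLH' : L < H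
      · rw [if_pos hLH']
        show H - 1 - L + 1 = H - L
        omega
      · rw [if_neg hLH']
        show (0 : Int) = H - L
        omega

-- ===== VERDICT (by name: the statement is the Claim_ definition above) =====
theorem solution_spec : Claim_equal_solution := by
  intro N M X Y _hd hpre
  unfold Spec_solution solution solution_alt
  have hK : (X.length : Int) % 2 = 0 ∨ (X.length : Int) % 2 = 1 := by omega
  rcases hK with h0 | h1
  · have hx : (X.length : Int) % 2 = 0 := h0
    have hnat : X.length % 2 = 0 := by omega
    obtain ⟨hX, hY⟩ := hpre hnat
    rw [if_neg (by omega), if_neg (by simp [hx]),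
        check_eq_axis _ _ _ (by positivity) hX, check_eq_axis _ _ _ (by positivity) hY]
  · rw [if_pos h1, if_pos (by omega)]
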